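-- pv_equiv track=rewrite | github.com/tzhou2018/LeetCode | other/examination/ali/swopString.py | func
-- ===== SOURCE A (Python) =====
-- def func(S, T):
--     hashmap = {}
--     # 首先统计每个字符串出现的次数是否相等
--     for e in S:
--         hashmap[e] = hashmap.get(e, 0) + 1
--     for e in T:
--         if e in hashmap:
--             hashmap[e] -= 1
--         else:
--             return -1
--     for k, v in hashmap.items():
--         if v != 0:
--             return -1
--     # 然后寻找不需要移动的字符串
--     i, j = 0, 0
--     while i < len(S) and j < len(T):
--         while i < len(S) and S[i] != T[j]:
--             i += 1
--         i += 1
--         j += 1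
--     return len(T) - j
-- ===== SOURCE B (Python) =====
-- def _lower(lst, x):
--     # first index k with lst[k] >= x (binary search; lst is sorted ascending)
--     lo, hi = 0, len(lst)
--     while lo < hi:
--         mid = (lo + hi) // 2
--         if lst[mid] < x:
--             lo = mid + 1
--         else:
--             hi = mid
--     return lo
--
--
-- def func(S, T):
--     if sorted(S) != sorted(T):
--         return -1
--     # inverted index: each character's positions in S, in increasing order
--     pos = {}
--     for idx, c in enumerate(S):
--         pos.setdefault(c, []).append(idx)
--     i, j = 0, 0
--     while i < len(S) and j < len(T):
--         lst = pos.get(T[j], [])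
--         k = _lower(lst, i)
--         i = (lst[k] if k < len(lst) else len(S)) + 1
--         j += 1
--     return len(T) - j
-- ===== Notes on version B (the rewrite author's own statement) =====
-- stated objective: alternative
-- what changed: Replaces the counting-dict anagram test with a sorted() comparison, and replaces the two-pointer phase's linear character scans of S with an inverted index mapping each character to its sorted position list, queried by a hand-written binary search.
import Mathlib
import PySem

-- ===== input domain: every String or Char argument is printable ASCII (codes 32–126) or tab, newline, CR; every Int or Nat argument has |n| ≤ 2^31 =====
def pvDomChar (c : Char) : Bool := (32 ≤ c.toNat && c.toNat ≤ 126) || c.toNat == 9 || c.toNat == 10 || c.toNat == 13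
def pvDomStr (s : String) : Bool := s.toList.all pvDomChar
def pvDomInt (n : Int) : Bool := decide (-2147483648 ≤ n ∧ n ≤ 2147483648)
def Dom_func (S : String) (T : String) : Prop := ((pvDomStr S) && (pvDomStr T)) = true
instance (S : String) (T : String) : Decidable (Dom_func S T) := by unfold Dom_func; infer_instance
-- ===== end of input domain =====

-- B replaces A's counting-dict anagram test by a sorted() comparison, and A's
-- character-scanning two-pointer phase by an inverted index of character
-- positions queried with a hand-written binary search (objective: alternative).

-- ===== PORT A =====

-- second loop of A: for e in T: if e in hashmap: hashmap[e] -= 1 else: return -1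
def checkT (d : PySem.Dict Char Int) : List Char → Option (PySem.Dict Char Int)
  | [] => some d
  | e :: t => if d.contains e then checkT (d.insert e (d.getD e 0 - 1)) t else none

-- inner while: while i < len(S) and S[i] != T[j]: i += 1   (c is the fixed T[j])
def scanA (Ls : List Char) (c : Char) (i : Nat) : Nat :=
  if h : i < Ls.length then
    if Ls[i] ≠ c then scanA Ls c (i + 1) else i
  else i
termination_by Ls.length - i

-- outer while of A; returns the final j
def loopA (Ls Lt : List Char) (i j : Nat) : Nat :=
  if i < Ls.length ∧ j < Lt.length then
    loopA Ls Lt (scanA Ls (Lt.getD j default) i + 1) (j + 1)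
  else j
termination_by Lt.length - j

def func (S : String) (T : String) : Int :=
  -- for e in S: hashmap[e] = hashmap.get(e, 0) + 1, then the T loop (checkT)
  match checkT (S.toList.foldl (fun d e => d.insert e (d.getD e 0 + 1)) PySem.Dict.empty) T.toList with
  | none => -1
  | some d2 =>
    -- for k, v in hashmap.items(): if v != 0: return -1
    if d2.items.any (fun p => p.2 != 0) then -1
    else ((T.toList.length : Int) - (loopA S.toList T.toList 0 0 : Int))

-- ===== PORT B =====

-- Source B's _lower: binary search, first index k with lst[k] >= x
-- (lst[mid] is in range whenever 0 ≤ lo < hi ≤ len lst, so getD is exact here)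
def lowerLoop (lst : List Int) (x : Int) (lo hi : Nat) : Nat :=
  if lo < hi then
    if lst.getD ((lo + hi) / 2) 0 < x then lowerLoop lst x ((lo + hi) / 2 + 1) hi
    else lowerLoop lst x lo ((lo + hi) / 2)
  else lo
termination_by hi - lo
decreasing_by all_goals omega

def lower (lst : List Int) (x : Int) : Nat := lowerLoop lst x 0 lst.length

-- Source B's pos-building loop: for idx, c in enumerate(S): pos.setdefault(c, []).append(idx)
def buildPos (Ls : List Char) : PySem.Dict Char (List Int) :=
  (PySem.List.enumerate Ls 0).foldl (fun d p => d.modify p.2 [] (· ++ [p.1])) PySem.Dict.empty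

-- Source B's while loop; the position lists hold nonnegative indices, so the .toNat
-- on the looked-up position is exact
def loopB (Ls Lt : List Char) (pos : PySem.Dict Char (List Int)) (i j : Nat) : Nat :=
  if h : i < Ls.length ∧ j < Lt.length then
    let lst := pos.getD (Lt.getD j default) []
    let k := lower lst (i : Int)
    loopB Ls Lt pos ((if hk : k < lst.length then (lst[k]).toNat else Ls.length) + 1) (j + 1)
  else j
termination_by Lt.length - j

def func_alt (S : String) (T : String) : Int :=
  if PySem.List.sorted S.toList (fun x => x) false ≠ PySem.List.sorted T.toList (fun x => x) false
  then -1
  else ((T.toList.length : Int) - (loopB S.toList T.toList (buildPos S.toList) 0 0 : Int))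

-- ===== PRECONDITION & SPEC =====
def Spec_func (S : String) (T : String) (out : Int) : Prop := out = func_alt S T
instance (S : String) (T : String) (out : Int) : Decidable (Spec_func S T out) := by unfold Spec_func; infer_instance

-- ===== CLAIM (what is proved, stated in full; the proofs are below) =====
def Claim_equal_func : Prop := ∀ (S : String) (T : String), Dom_func S T → Spec_func S T (func S T)

-- ===== LEMMAS AND PROOFS =====

theorem checkT_none (t : List Char) (d : PySem.Dict Char Int)
    (h : ∃ e ∈ t, d.contains e = false) : checkT d t = none := by
  induction t generalizing d with
  | nil => simp at h
  | cons e t ih =>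
    obtain ⟨e', he', hc⟩ := h
    unfold checkT
    by_cases hce : d.contains e = true
    · simp only [hce, if_true]
      apply ih
      rcases List.mem_cons.mp he' with rfl | hmem
      · exact absurd hce (by simp [hc])
      · refine ⟨e', hmem, ?_⟩
        rw [PySem.Dict.contains_insert]
        have : (e' == e) = false := by
          by_contra hne
          simp at hne
          subst hne
          exact absurd hce (by simp [hc])
        simp [this, hc]
    · simp at hce
      rcases List.mem_cons.mp he' with rfl | hmem
      · simp [hce]
      · by_cases hx : d.contains e = true
        · simp [hx] at hce
        · simp at hx; simp [hx]

theorem checkT_some (t : List Char) (d : PySem.Dict Char Int)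
    (h : ∀ e ∈ t, d.contains e = true) :
    ∃ d', checkT d t = some d' ∧ (∀ v, d'.getD v 0 = d.getD v 0 - (t.count v : Int)) ∧
      d'.keys = d.keys := by
  induction t generalizing d with
  | nil => exact ⟨d, rfl, by simp, rfl⟩
  | cons e t ih =>
    have hce : d.contains e = true := h e (List.mem_cons_self)
    have hkeys1 : (d.insert e (d.getD e 0 - 1)).keys = d.keys := by
      have := PySem.Dict.items_insert_of_contains (d := d) (k := e) (v := d.getD e 0 - 1) hce
      simp only [PySem.Dict.keys, this, List.map_map]
      apply List.map_congr_left
      intro p _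
      by_cases hp : p.1 = e
      · simp [hp]
      · simp [hp]
    have h' : ∀ e' ∈ t, (d.insert e (d.getD e 0 - 1)).contains e' = true := by
      intro e' he'
      rw [PySem.Dict.contains_insert]
      by_cases hee : (e' == e) = true
      · simp [hee]
      · simp [hee, h e' (List.mem_cons_of_mem _ he')]
    obtain ⟨d', hd', hval, hk⟩ := ih _ h'
    refine ⟨d', ?_, ?_, hk.trans hkeys1⟩
    · unfold checkT; simp [hce, hd']
    · intro v
      rw [hval v, PySem.Dict.getD_insert]
      by_cases hv : v = e
      · subst hv; simp; ring
      · simp [hv, Ne.symm hv]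

-- the counter built by A's first loop
theorem counter_getD (Ls : List Char) (v : Char) :
    (Ls.foldl (fun d e => d.insert e (d.getD e 0 + 1)) (PySem.Dict.empty : PySem.Dict Char Int)).getD v 0
      = (Ls.count v : Int) := by
  rw [PySem.Dict.getD_foldl_insert_add_one]
  simp

theorem counter_keys (Ls : List Char) :
    (Ls.foldl (fun d e => d.insert e (d.getD e 0 + 1)) (PySem.Dict.empty : PySem.Dict Char Int)).keys
      = PySem.Set.ofList Ls := by
  rw [PySem.Dict.foldl_insert_getD_add_one_eq_counter, PySem.Dict.keys_counter]

theorem counter_contains (Ls : List Char) (v : Char) :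
    (Ls.foldl (fun d e => d.insert e (d.getD e 0 + 1)) (PySem.Dict.empty : PySem.Dict Char Int)).contains v
      = Ls.contains v := by
  rw [PySem.Dict.foldl_insert_getD_add_one_eq_counter, PySem.Dict.contains_counter]

theorem counter_nodup (Ls : List Char) :
    (Ls.foldl (fun d e => d.insert e (d.getD e 0 + 1)) (PySem.Dict.empty : PySem.Dict Char Int)).keys.Nodup := by
  rw [PySem.Dict.foldl_insert_getD_add_one_eq_counter]
  exact PySem.Dict.nodup_keys_counter _

-- scanA finds the first occurrence of c in Ls at or after i (or len(Ls))
theorem scanA_spec (Ls : List Char) (c : Char) (i : Nat) (hi : i ≤ Ls.length) :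
    scanA Ls c i = match PySem.List.index? (Ls.drop i) c with
      | some k => i + k
      | none => Ls.length := by
  unfold scanA
  split
  · rename_i h
    have hdrop : Ls.drop i = Ls[i] :: Ls.drop (i + 1) := List.drop_eq_getElem_cons h
    by_cases hc : Ls[i] = c
    · rw [if_neg (by simp [hc]), hdrop, hc, PySem.List.index?_cons_self]
      simp
    · rw [if_pos hc, scanA_spec Ls c (i + 1) h, hdrop, PySem.List.index?_cons_of_ne _ hc]
      cases hidx : PySem.List.index? (Ls.drop (i + 1)) c with
      | none => simp
      | some k =>
        simp only [Option.map_some]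
        show i + 1 + k = i + (k + 1)
        omega
  · rename_i h
    have hieq : i = Ls.length := by omega
    subst hieq
    rw [List.drop_length]
    simp
termination_by Ls.length - i

theorem scanA_ge (Ls : List Char) (c : Char) (i : Nat) : i ≤ scanA Ls c i := by
  unfold scanA
  split
  · split
    · exact le_trans (Nat.le_succ i) (scanA_ge Ls c (i + 1))
    · exact le_rfl
  · exact le_rfl
termination_by Ls.length - i

theorem scanA_le (Ls : List Char) (c : Char) (i : Nat) (hi : i ≤ Ls.length) :
    scanA Ls c i ≤ Ls.length := by
  unfold scanA
  split
  · split
    · exact scanA_le Ls c (i + 1) (by omega)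
    · omega
  · omega
termination_by Ls.length - i

-- monotone access on a (≤)-pairwise list
theorem pairwise_le_getElem (lst : List Int) (hs : lst.Pairwise (· ≤ ·))
    (a b : Nat) (hab : a ≤ b) (hb : b < lst.length) :
    lst[a]'(lt_of_le_of_lt hab hb) ≤ lst[b] := by
  rcases lt_or_eq_of_le hab with hlt | heq
  · exact (List.pairwise_iff_getElem.mp hs) a b _ hb hlt
  · subst heq; exact le_rfl

theorem lowerLoop_spec (lst : List Int) (x : Int) (hs : lst.Pairwise (· ≤ ·)) :
    ∀ lo hi, lo ≤ hi → hi ≤ lst.length →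
    (∀ t, t < lo → (ht : t < lst.length) → lst[t] < x) →
    (∀ t, hi ≤ t → (ht : t < lst.length) → x ≤ lst[t]) →
    lo ≤ lowerLoop lst x lo hi ∧ lowerLoop lst x lo hi ≤ hi ∧
    (∀ t, t < lowerLoop lst x lo hi → (ht : t < lst.length) → lst[t] < x) ∧
    (∀ t, lowerLoop lst x lo hi ≤ t → (ht : t < lst.length) → x ≤ lst[t]) := by
  intro lo hi h1 h2 hbelow habove
  unfold lowerLoop
  by_cases hlh : lo < hi
  · rw [if_pos hlh]
    have hmid1 : lo ≤ (lo + hi) / 2 := by omega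
    have hmid2 : (lo + hi) / 2 < hi := by omega
    have hmlt : (lo + hi) / 2 < lst.length := by omega
    rw [List.getD_eq_getElem lst 0 hmlt]
    by_cases hcmp : lst[(lo + hi) / 2] < x
    · rw [if_pos hcmp]
      have := lowerLoop_spec lst x hs ((lo + hi) / 2 + 1) hi (by omega) h2
        (by
          intro t ht htl
          calc lst[t] ≤ lst[(lo + hi) / 2] := pairwise_le_getElem lst hs t _ (by omega) hmlt
            _ < x := hcmp)
        habove
      exact ⟨by omega, this.2.1, this.2.2.1, this.2.2.2⟩
    · rw [if_neg hcmp]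
      push_neg at hcmp
      have := lowerLoop_spec lst x hs lo ((lo + hi) / 2) (by omega) (by omega) hbelow
        (by
          intro t ht htl
          calc x ≤ lst[(lo + hi) / 2] := hcmp
            _ ≤ lst[t] := pairwise_le_getElem lst hs _ t ht htl)
      exact ⟨this.1, by omega, this.2.2.1, this.2.2.2⟩
  · rw [if_neg hlh]
    exact ⟨le_rfl, h1, hbelow, by
      intro t hlo ht
      exact habove t (by omega) ht⟩
termination_by lo hi => hi - lo
decreasing_by all_goals omega

theorem lower_spec (lst : List Int) (x : Int) (hs : lst.Pairwise (· ≤ ·)) :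
    lower lst x ≤ lst.length ∧
    (∀ t, t < lower lst x → (ht : t < lst.length) → lst[t] < x) ∧
    (∀ t, lower lst x ≤ t → (ht : t < lst.length) → x ≤ lst[t]) := by
  have := lowerLoop_spec lst x hs 0 lst.length (by omega) le_rfl
    (by intro t ht _; omega) (by intro t ht htl; omega)
  exact ⟨this.2.1, this.2.2.1, this.2.2.2⟩

-- the position list Source B's dict stores under c
def posList (Ls : List Char) (c : Char) : List Int :=
  ((PySem.List.enumerate Ls 0).filter (fun p => p.2 == c)).map (·.1)

theorem getD_buildPos (Ls : List Char) (c : Char) :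
    (buildPos Ls).getD c [] = posList Ls c := by
  unfold buildPos posList
  have hswap : (PySem.List.enumerate Ls 0).foldl (fun d p => d.modify p.2 [] (· ++ [p.1]))
      (PySem.Dict.empty : PySem.Dict Char (List Int))
      = ((PySem.List.enumerate Ls 0).map Prod.swap).foldl
          (fun d p => d.modify p.1 [] (· ++ [p.2])) PySem.Dict.empty := by
    rw [List.foldl_map]
    rfl
  rw [hswap, PySem.Dict.getD_foldl_modify_append]
  rw [List.filter_map, List.map_map]
  rfl

theorem posList_pairwise (Ls : List Char) (c : Char) :
    (posList Ls c).Pairwise (· < ·) := by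
  unfold posList
  rw [List.pairwise_map]
  exact ((PySem.List.pairwise_lt_enumerate Ls 0).filter _)

theorem mem_posList (Ls : List Char) (c : Char) (v : Int) :
    v ∈ posList Ls c ↔ ∃ (k : Nat) (hk : k < Ls.length), v = (k : Int) ∧ Ls[k] = c := by
  unfold posList
  simp only [List.mem_map, List.mem_filter]
  constructor
  · rintro ⟨p, ⟨hp, hpc⟩, rfl⟩
    obtain ⟨k, hk, rfl⟩ := (PySem.List.mem_enumerate_iff _ _ _).mp hp
    exact ⟨k, hk, by simp, by simpa using hpc⟩
  · rintro ⟨k, hk, rfl, hkc⟩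
    refine ⟨((k : Int), Ls[k]), ⟨?_, by simpa⟩, rfl⟩
    exact (PySem.List.mem_enumerate_iff _ _ _).mpr ⟨k, hk, by simp⟩

-- the crux: binary search into the position list computes exactly A's inner scan
theorem lower_posList (Ls : List Char) (c : Char) (i : Nat) (hi : i ≤ Ls.length) :
    (if h : lower (posList Ls c) (i : Int) < (posList Ls c).length
      then ((posList Ls c)[lower (posList Ls c) (i : Int)]'h).toNat else Ls.length)
    = scanA Ls c i := by
  have hlt := posList_pairwise Ls c
  have hle : (posList Ls c).Pairwise (· ≤ ·) := hlt.imp le_of_lt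
  obtain ⟨hk1, hk2, hk3⟩ := lower_spec (posList Ls c) (i : Int) hle
  rw [scanA_spec Ls c i hi]
  cases hidx : PySem.List.index? (Ls.drop i) c with
  | none =>
    have hnotin : c ∉ Ls.drop i := (PySem.List.index?_eq_none_iff _ _).mp hidx
    have hfull : ¬ lower (posList Ls c) (i : Int) < (posList Ls c).length := by
      intro hklt
      have hmem := List.getElem_mem hklt
      obtain ⟨m, hm, hv, hc⟩ := (mem_posList Ls c _).mp hmem
      have hge := hk3 _ le_rfl hklt
      rw [hv] at hge
      have him : i ≤ m := by exact_mod_cast hge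
      have : Ls[m] ∈ Ls.drop i := by
        have hlen : m - i < (Ls.drop i).length := by
          rw [List.length_drop]; omega
        have : (Ls.drop i)[m - i] = Ls[m] := by
          simp only [List.getElem_drop]
          simp only [show i + (m - i) = m from by omega]
        rw [← this]
        exact List.getElem_mem hlen
      rw [hc] at this
      exact hnotin this
    simp [hfull]
  | some m =>
    obtain ⟨hm, hem, hmin⟩ := PySem.List.getElem_of_index?_eq_some hidx
    rw [List.length_drop] at hm
    have him : i + m < Ls.length := by omega
    have hLim : Ls[i + m] = c := by
      rw [← hem, List.getElem_drop]
    have hmem : ((i + m : Nat) : Int) ∈ posList Ls c :=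
      (mem_posList Ls c _).mpr ⟨i + m, him, rfl, hLim⟩
    obtain ⟨s, hslt, hPs⟩ := List.mem_iff_getElem.mp hmem
    have hks : lower (posList Ls c) (i : Int) ≤ s := by
      by_contra hgt
      push_neg at hgt
      have := hk2 s hgt hslt
      rw [hPs] at this
      omega
    have hklt : lower (posList Ls c) (i : Int) < (posList Ls c).length := by omega
    rw [dif_pos hklt]
    -- P[k] is a position of c, ≥ i, minimal: it equals i + m
    obtain ⟨m', hm', hv', hc'⟩ := (mem_posList Ls c _).mp (List.getElem_mem hklt)
    have hgei : (i : Int) ≤ (posList Ls c)[lower (posList Ls c) (i : Int)] :=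
      hk3 _ le_rfl hklt
    rw [hv'] at hgei
    have him' : i ≤ m' := by exact_mod_cast hgei
    have hm'ge : i + m ≤ m' := by
      by_contra hlt'
      push_neg at hlt'
      have hsub : m' - i < m := by omega
      have : (Ls.drop i)[m' - i]'(by rw [List.length_drop]; omega) ≠ c := hmin (m' - i) hsub
      apply this
      simp only [List.getElem_drop]
      simp only [show i + (m' - i) = m' from by omega]
      exact hc'
    have hub : (posList Ls c)[lower (posList Ls c) (i : Int)]'hklt ≤ ((i + m : Nat) : Int) := by
      rw [← hPs]
      exact pairwise_le_getElem _ hle _ s hks hslt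
    have heq : (posList Ls c)[lower (posList Ls c) (i : Int)]'hklt = ((i + m : Nat) : Int) := by
      rw [hv'] at hub ⊢
      have : m' ≤ i + m := by exact_mod_cast hub
      have : m' = i + m := by omega
      simp [this]
    rw [heq]
    show ((i + m : Nat) : Int).toNat = i + m
    exact Int.toNat_natCast (i + m)

theorem loopB_eq_loopA (Ls Lt : List Char) :
    ∀ n i j, Ls.length + 1 - i ≤ n → i ≤ Ls.length →
      loopB Ls Lt (buildPos Ls) i j = loopA Ls Lt i j := by
  intro n
  induction n with
  | zero => intro i j hn hi; omega
  | succ n ih =>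
    intro i j hn hi
    unfold loopB loopA
    by_cases hguard : i < Ls.length ∧ j < Lt.length
    · rw [dif_pos hguard, if_pos hguard]
      simp only [getD_buildPos]
      rw [lower_posList Ls (Lt.getD j default) i (le_of_lt hguard.1)]
      have hge := scanA_ge Ls (Lt.getD j default) i
      have hle := scanA_le Ls (Lt.getD j default) i (le_of_lt hguard.1)
      by_cases hend : scanA Ls (Lt.getD j default) i + 1 ≤ Ls.length
      · exact ih _ (j + 1) (by omega) hend
      · -- the new i is len(S)+1: both loops exit on the next test
        unfold loopB loopA
        rw [dif_neg (by omega), if_neg (by omega)]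
    · rw [dif_neg hguard, if_neg hguard]

-- ===== VERDICT (by name: the statement is the Claim_ definition above) =====
theorem func_spec : Claim_equal_func := by
  unfold Claim_equal_func
  intro S T _
  unfold Spec_func func func_alt
  set Ls := S.toList with hLs
  set Lt := T.toList with hLt
  by_cases hperm : Ls.Perm Lt
  · -- anagrams: A's checks pass, B's sorted test passes, loops agree
    have hsorted : PySem.List.sorted Ls (fun x => x) false = PySem.List.sorted Lt (fun x => x) false :=
      (PySem.List.sorted_id_eq_sorted_id_iff_perm Ls Lt).mpr hperm
    have hcnt : ∀ v, Ls.count v = Lt.count v := fun v => hperm.count_eq v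
    obtain ⟨d2, hd2, hval, hkeys⟩ := checkT_some Lt (Ls.foldl (fun d e => d.insert e (d.getD e 0 + 1)) PySem.Dict.empty) (by
      intro e he
      rw [counter_contains]
      simp [hperm.mem_iff.mpr he])
    have hzero : ∀ v, d2.getD v 0 = 0 := by
      intro v
      rw [hval v, counter_getD, hcnt v]
      ring
    have hany : d2.items.any (fun p => p.2 != 0) = false := by
      rw [PySem.Dict.items_eq_map_keys d2 (hkeys ▸ counter_nodup Ls) 0]
      simp only [List.any_map]
      rw [List.any_eq_false]
      intro k _
      simp [hzero k]
    rw [hd2]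
    simp only [hany, Bool.false_eq_true, if_false]
    rw [if_neg (not_not_intro hsorted)]
    rw [loopB_eq_loopA Ls Lt (Ls.length + 1) 0 0 (by omega) (by omega)]
  · -- not anagrams: both return -1
    have hsorted : PySem.List.sorted Ls (fun x => x) false ≠ PySem.List.sorted Lt (fun x => x) false := by
      intro h
      exact hperm ((PySem.List.sorted_id_eq_sorted_id_iff_perm Ls Lt).mp h)
    rw [if_pos hsorted]
    by_cases hsub : ∀ e ∈ Lt, e ∈ Ls
    · -- all of T's chars occur in S but some count differs
      obtain ⟨d2, hd2, hval, hkeys⟩ := checkT_some Lt (Ls.foldl (fun d e => d.insert e (d.getD e 0 + 1)) PySem.Dict.empty) (by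
        intro e he
        rw [counter_contains]
        simp [hsub e he])
      rw [hd2]
      have hdiff : ∃ v, Ls.count v ≠ Lt.count v := by
        by_contra hall
        push_neg at hall
        exact hperm (List.perm_iff_count.mpr hall)
      obtain ⟨v, hv⟩ := hdiff
      have hvS : v ∈ Ls := by
        by_contra hvS
        have h1 : Ls.count v = 0 := List.count_eq_zero.mpr hvS
        have h2 : Lt.count v = 0 := List.count_eq_zero.mpr (fun hvT => hvS (hsub v hvT))
        omega
      have hvkeys : v ∈ d2.keys := by
        rw [hkeys, counter_keys]
        exact (PySem.Set.mem_ofList Ls v).mpr hvS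
      have hany : d2.items.any (fun p => p.2 != 0) = true := by
        rw [PySem.Dict.items_eq_map_keys d2 (hkeys ▸ counter_nodup Ls) 0]
        simp only [List.any_map]
        rw [List.any_eq_true]
        refine ⟨v, hvkeys, ?_⟩
        show (d2.getD v 0 != 0) = true
        rw [hval v, counter_getD]
        simp only [bne_iff_ne, ne_eq]
        intro h
        apply hv
        omega
      simp [hany]
    · -- some char of T is missing from S: A's second loop returns -1
      push_neg at hsub
      obtain ⟨e, he, heS⟩ := hsub
      rw [checkT_none Lt _ ⟨e, he, by rw [counter_contains]; simp [heS]⟩]
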